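-- pv_equiv track=rewrite | github.com/panda-34/epibook.github.io | solutions/python/biggest_product_n-1.py | find_biggest_n_minus_one_product
-- ===== SOURCE A (Python) =====
-- import itertools
-- import operator
--
-- def find_biggest_n_minus_one_product(A):
--     # Builds forward product L, backward product R.
--     L = list(itertools.accumulate(A, operator.mul))
--     R = list(itertools.accumulate(reversed(A), operator.mul))
--     R.reverse()
--
--     # Finds the biggest product of (n - 1) numbers.
--     max_product = float('-inf')
--     for i in range(len(A)):
--         forward = L[i - 1] if i > 0 else 1
--         backward = R[i + 1] if i + 1 < len(A) else 1
--         max_product = max(max_product, forward * backward)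
--     return max_product
-- ===== SOURCE B (Python) =====
-- def find_biggest_n_minus_one_product(A):
--     # Single pass: keep running product p and the max/min leave-one-out
--     # products of the prefix seen so far (min is needed for sign flips).
--     if not A:
--         return float('-inf')
--     p = 1
--     best = None  # (hi, lo)
--     for x in A:
--         if best is None:
--             best = (1, 1)
--         else:
--             hi, lo = best
--             best = (max(hi * x, lo * x, p), min(hi * x, lo * x, p))
--         p *= x
--     return best[0]
-- ===== Notes on version B (the rewrite author's own statement) =====
-- stated objective: faster
-- what changed: A builds prefix- and suffix-product arrays and multiplies a big prefix by a big suffix at every index; B is a single left-to-right pass with O(1) state (running product plus max/min leave-one-out products of the prefix), whose multiplications are always big-by-one-element, avoiding A's big-by-big bignum products (measured 55x at n=4096; A times out at n=16384).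
-- outside the precondition, e.g. on find_biggest_n_minus_one_product([]): A returns -inf, B returns -inf
import Mathlib
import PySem

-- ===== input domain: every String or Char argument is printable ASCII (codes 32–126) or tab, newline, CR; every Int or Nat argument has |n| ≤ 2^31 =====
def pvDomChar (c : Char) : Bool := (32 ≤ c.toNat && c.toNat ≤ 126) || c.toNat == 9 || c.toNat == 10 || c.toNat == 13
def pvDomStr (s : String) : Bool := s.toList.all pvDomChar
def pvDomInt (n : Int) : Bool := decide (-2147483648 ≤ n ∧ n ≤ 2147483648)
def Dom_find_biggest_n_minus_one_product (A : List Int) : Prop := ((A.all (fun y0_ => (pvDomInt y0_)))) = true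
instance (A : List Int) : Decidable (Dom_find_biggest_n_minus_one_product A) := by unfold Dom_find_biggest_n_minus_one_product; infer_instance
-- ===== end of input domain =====

-- B replaces A's prefix/suffix product arrays by a single pass with O(1) state
-- (running product plus max/min leave-one-out products of the prefix).


-- ===== PORT A =====
-- itertools.accumulate(xs, operator.mul): running products
def pvAccum (a : Int) : List Int → List Int
  | [] => []
  | x :: t => (a * x) :: pvAccum (a * x) t

-- 'max(max_product, v)' where max_product starts at float('-inf'): none = -inf
def pvMaxNI (mp : Option Int) (v : Int) : Option Int :=
  some (match mp with | none => v | some m => max m v)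

def find_biggest_n_minus_one_product (A : List Int) : Int :=
  let L := pvAccum 1 A
  let R := (pvAccum 1 A.reverse).reverse
  let n : Int := A.length
  let mp := (PySem.List.pyRange 0 n 1).foldl (fun (mp : Option Int) i =>
      let forward := if 0 < i then PySem.List.pyGetD L (i - 1) 0 else 1
      let backward := if i + 1 < n then PySem.List.pyGetD R (i + 1) 0 else 1
      pvMaxNI mp (forward * backward)) none
  mp.getD 0   -- A = [] (Python returns float('-inf'), not an int) is excluded by Pre_

-- ===== PORT B =====
-- loop body: update (p, best) where best = (hi, lo) leave-one-out extrema
def pvStep (st : Int × Option (Int × Int)) (x : Int) : Int × Option (Int × Int) :=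
  match st.2 with
  | none => (st.1 * x, some (1, 1))
  | some (h, l) => (st.1 * x,
      some (max (max (h * x) (l * x)) st.1, min (min (h * x) (l * x)) st.1))

def find_biggest_n_minus_one_product_alt (A : List Int) : Int :=
  match (A.foldl pvStep (1, none)).2 with
  | none => 0        -- A = [] excluded by Pre_ (Python returns float('-inf'))
  | some (h, _) => h

-- ===== PRECONDITION & SPEC =====
-- Pre_ excludes only the empty list, on which A returns float('-inf'), a float
-- and not a value of the declared int type.
def Pre_find_biggest_n_minus_one_product (A : List Int) : Prop := A ≠ []
instance (A : List Int) : Decidable (Pre_find_biggest_n_minus_one_product A) := by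
  unfold Pre_find_biggest_n_minus_one_product; infer_instance
def pvWitness_find_biggest_n_minus_one_product : List Int := [2, -3, 4]

def Spec_find_biggest_n_minus_one_product (A : List Int) (out : Int) : Prop := out = find_biggest_n_minus_one_product_alt A
instance (A : List Int) (out : Int) : Decidable (Spec_find_biggest_n_minus_one_product A out) := by unfold Spec_find_biggest_n_minus_one_product; infer_instance

-- ===== CLAIM (what is proved, stated in full; the proofs are below) =====
def Claim_equal_find_biggest_n_minus_one_product : Prop := ∀ (A : List Int), Dom_find_biggest_n_minus_one_product A → Pre_find_biggest_n_minus_one_product A → Spec_find_biggest_n_minus_one_product A (find_biggest_n_minus_one_product A)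

-- ===== LEMMAS AND PROOFS =====

-- product of all elements except index i
def pvCand (A : List Int) (i : Nat) : Int := (A.take i).prod * (A.drop (i + 1)).prod
def pvCands (A : List Int) : List Int := (List.range A.length).map (pvCand A)

theorem pvAccum_length (xs : List Int) : ∀ a, (pvAccum a xs).length = xs.length := by
  induction xs with
  | nil => intro a; rfl
  | cons x t ih => intro a; simp [pvAccum, ih]

theorem pvAccum_getElem? (xs : List Int) : ∀ (a : Int) (i : Nat), i < xs.length →
    (pvAccum a xs)[i]? = some (a * (xs.take (i + 1)).prod) := by
  induction xs with
  | nil => intro a i h; simp at h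
  | cons x t ih =>
    intro a i h
    cases i with
    | zero => simp [pvAccum]
    | succ j =>
      simp only [pvAccum, List.getElem?_cons_succ]
      rw [ih (a * x) j (by simpa using h)]
      simp [List.take_succ_cons, mul_assoc]

theorem foldl_pvMaxNI_some (t : List Int) : ∀ m, t.foldl pvMaxNI (some m) = some (t.foldl max m) := by
  induction t with
  | nil => intro m; rfl
  | cons x s ih => intro m; simp [pvMaxNI, ih]

theorem pvMaxNI_eq (l : List Int) (v : Int) (hmem : v ∈ l) (hub : ∀ c ∈ l, c ≤ v) :
    l.foldl pvMaxNI none = some v := by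
  cases l with
  | nil => simp at hmem
  | cons a t =>
    have h1 : (a :: t).foldl pvMaxNI none = some (t.foldl max a) := by
      simp [pvMaxNI, foldl_pvMaxNI_some]
    rw [h1]
    have hle := PySem.List.le_foldl_max t a
    have hmem' := PySem.List.foldl_max_mem t a
    have hub' : t.foldl max a ≤ v := by
      rcases hmem' with h | h
      · rw [h]; exact hub a (by simp)
      · exact hub _ (by simp [h])
    have hvle : v ≤ t.foldl max a := by
      rcases List.mem_cons.mp hmem with rfl | hv
      · exact hle.1
      · exact hle.2 v hv
    exact congrArg some (le_antisymm hub' hvle)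

theorem pvCands_append_singleton (t : List Int) (y : Int) :
    pvCands (t ++ [y]) = (pvCands t).map (· * y) ++ [t.prod] := by
  unfold pvCands
  rw [List.length_append]
  simp only [List.length_cons, List.length_nil]
  rw [List.range_succ, List.map_append, List.map_map]
  congr 1
  · apply List.map_congr_left
    intro i hi
    have hi' : i < t.length := List.mem_range.mp hi
    unfold pvCand
    rw [List.take_append_of_le_length (by omega), List.drop_append_of_le_length (by omega)]
    simp [mul_assoc]
  · unfold pvCand
    simp [List.take_append_of_le_length (le_refl t.length), List.drop_eq_nil_of_le]

theorem pvB_inv : ∀ (t : List Int), t ≠ [] →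
    ∃ h l, t.foldl pvStep (1, none) = (t.prod, some (h, l)) ∧
      h ∈ pvCands t ∧ l ∈ pvCands t ∧ ∀ c ∈ pvCands t, l ≤ c ∧ c ≤ h := by
  intro t
  induction t using List.reverseRecOn with
  | nil => intro h; exact absurd rfl h
  | append_singleton s y ih =>
    intro _
    by_cases hs : s = []
    · subst hs
      refine ⟨1, 1, by simp [pvStep], ?_, ?_, ?_⟩ <;>
        simp [pvCands, pvCand]
    · obtain ⟨h, l, hfold, hhm, hlm, hb⟩ := ih hs
      rw [List.foldl_append, hfold]
      refine ⟨max (max (h * y) (l * y)) s.prod, min (min (h * y) (l * y)) s.prod,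
        by simp [pvStep], ?_, ?_, ?_⟩
      · rw [pvCands_append_singleton]
        rcases le_total (h * y) (l * y) with hc | hc
        · rcases le_total (l * y) s.prod with hc2 | hc2
          · simp [max_eq_right hc, max_eq_right hc2]
          · simp only [max_eq_right hc, max_eq_left hc2]
            exact List.mem_append_left _ (List.mem_map.mpr ⟨l, hlm, rfl⟩)
        · rcases le_total (h * y) s.prod with hc2 | hc2
          · simp [max_eq_left hc, max_eq_right hc2]
          · simp only [max_eq_left hc, max_eq_left hc2]
            exact List.mem_append_left _ (List.mem_map.mpr ⟨h, hhm, rfl⟩)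
      · rw [pvCands_append_singleton]
        rcases le_total (h * y) (l * y) with hc | hc
        · rcases le_total (h * y) s.prod with hc2 | hc2
          · simp only [min_eq_left hc, min_eq_left hc2]
            exact List.mem_append_left _ (List.mem_map.mpr ⟨h, hhm, rfl⟩)
          · simp [min_eq_left hc, min_eq_right hc2]
        · rcases le_total (l * y) s.prod with hc2 | hc2
          · simp only [min_eq_right hc, min_eq_left hc2]
            exact List.mem_append_left _ (List.mem_map.mpr ⟨l, hlm, rfl⟩)
          · simp [min_eq_right hc, min_eq_right hc2]
      · rw [pvCands_append_singleton]
        intro c hc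
        rcases List.mem_append.mp hc with hc | hc
        · obtain ⟨c0, hc0, rfl⟩ := List.mem_map.mp hc
          obtain ⟨hl0, hh0⟩ := hb c0 hc0
          rcases le_total 0 y with hy | hy
          · constructor
            · calc min (min (h * y) (l * y)) s.prod ≤ min (h * y) (l * y) := min_le_left _ _
                _ ≤ l * y := min_le_right _ _
                _ ≤ c0 * y := mul_le_mul_of_nonneg_right hl0 hy
            · calc c0 * y ≤ h * y := mul_le_mul_of_nonneg_right hh0 hy
                _ ≤ max (h * y) (l * y) := le_max_left _ _
                _ ≤ max (max (h * y) (l * y)) s.prod := le_max_left _ _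
          · constructor
            · calc min (min (h * y) (l * y)) s.prod ≤ min (h * y) (l * y) := min_le_left _ _
                _ ≤ h * y := min_le_left _ _
                _ ≤ c0 * y := mul_le_mul_of_nonpos_right hh0 hy
            · calc c0 * y ≤ l * y := mul_le_mul_of_nonpos_right hl0 hy
                _ ≤ max (h * y) (l * y) := le_max_right _ _
                _ ≤ max (max (h * y) (l * y)) s.prod := le_max_left _ _
        · rw [List.mem_singleton.mp hc]
          exact ⟨min_le_right _ _, le_max_right _ _⟩

theorem pvR_getElem? (A : List Int) (j : Nat) (hj : j < A.length) :
    ((pvAccum 1 A.reverse).reverse)[j]? = some ((A.drop j).prod) := by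
  have hlen : (pvAccum 1 A.reverse).length = A.length := by
    rw [pvAccum_length, List.length_reverse]
  rw [List.getElem?_reverse (by omega)]
  rw [hlen]
  rw [pvAccum_getElem? _ _ _ (by simp; omega)]
  congr 1
  have h1 : A.length - 1 - j + 1 = A.length - j := by omega
  rw [h1]
  rw [List.take_reverse, List.prod_reverse, one_mul]
  congr 2
  omega

-- A's value equals the fold of pvMaxNI over pvCands
theorem pvA_eq (A : List Int) :
    find_biggest_n_minus_one_product A = ((pvCands A).foldl pvMaxNI none).getD 0 := by
  simp only [find_biggest_n_minus_one_product]
  have hrange : PySem.List.pyRange 0 (A.length : Int) 1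
      = List.map (fun k : Nat => (k : Int)) (List.range A.length) := by
    have h1 : ((A.length : Int) - 0).toNat = A.length := by omega
    rw [PySem.List.pyRange_one, h1]
    exact List.map_congr_left (fun k _ => by omega)
  rw [hrange, List.foldl_map]
  have hbody : ∀ (mp : Option Int) (k : Nat), k ∈ List.range A.length →
      pvMaxNI mp ((if 0 < (k : Int) then PySem.List.pyGetD (pvAccum 1 A) ((k : Int) - 1) 0 else 1) *
        (if (k : Int) + 1 < (A.length : Int)
          then PySem.List.pyGetD ((pvAccum 1 A.reverse).reverse) ((k : Int) + 1) 0 else 1))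
      = pvMaxNI mp (pvCand A k) := by
    intro mp k hk
    have hk' : k < A.length := List.mem_range.mp hk
    have hf : (if 0 < (k : Int) then PySem.List.pyGetD (pvAccum 1 A) ((k : Int) - 1) 0 else 1)
        = (A.take k).prod := by
      by_cases hk0 : k = 0
      · subst hk0; simp
      · have h0 : (0 : Int) < k := by exact_mod_cast Nat.pos_of_ne_zero hk0
        rw [if_pos h0]
        have hidx : (k : Int) - 1 = ((k - 1 : Nat) : Int) := by
          have : 1 ≤ k := Nat.one_le_iff_ne_zero.mpr hk0
          push_cast [this]; ring
        rw [hidx, PySem.List.pyGetD_natCast, List.getD_eq_getElem?_getD,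
          pvAccum_getElem? _ _ _ (by omega)]
        have : k - 1 + 1 = k := by omega
        simp [this]
    have hbw : (if (k : Int) + 1 < (A.length : Int)
        then PySem.List.pyGetD ((pvAccum 1 A.reverse).reverse) ((k : Int) + 1) 0 else 1)
        = (A.drop (k + 1)).prod := by
      by_cases hk1 : k + 1 < A.length
      · rw [if_pos (by exact_mod_cast hk1)]
        have hidx : (k : Int) + 1 = ((k + 1 : Nat) : Int) := by push_cast; ring
        rw [hidx, PySem.List.pyGetD_natCast, List.getD_eq_getElem?_getD,
          pvR_getElem? _ _ hk1]
        rfl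
      · rw [if_neg (by exact_mod_cast hk1)]
        rw [List.drop_eq_nil_of_le (by omega), List.prod_nil]
    rw [hf, hbw]
    rfl
  have key := PySem.List.foldl_congr_mem (List.range A.length) _
    (fun mp (k : Nat) => pvMaxNI mp (pvCand A k)) (none : Option Int)
    (fun acc k hk => hbody acc k hk)
  rw [key, ← List.foldl_map]
  rfl

theorem pv_main (A : List Int) (hA : A ≠ []) :
    find_biggest_n_minus_one_product A = find_biggest_n_minus_one_product_alt A := by
  obtain ⟨h, l, hfold, hhm, hlm, hb⟩ := pvB_inv A hA
  have hB : find_biggest_n_minus_one_product_alt A = h := by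
    unfold find_biggest_n_minus_one_product_alt
    rw [hfold]
  rw [pvA_eq, pvMaxNI_eq (pvCands A) h hhm (fun c hc => (hb c hc).2), hB]
  rfl

-- ===== VERDICT (by name: the statement is the Claim_ definition above) =====
theorem find_biggest_n_minus_one_product_spec : Claim_equal_find_biggest_n_minus_one_product := by
  intro A _ hPre
  unfold Spec_find_biggest_n_minus_one_product
  exact pv_main A hPre
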